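-- pv_equiv track=rewrite | github.com/Cazzy-Aporbo/Synapse | synapse-ai-system.py | fractal_recursion
-- ===== SOURCE A (Python) =====
-- from typing import Dict, List, Optional, Tuple, Any, Union, Set, Callable
--
-- def fractal_recursion(prompt: str, depth: int = 3) -> List[str]:
--     """Generate ideas using fractal recursion"""
--     ideas = []
--
--     def fractal_generate(text: str, level: int):
--         if level <= 0:
--             return [text]
--
--         branches = []
--         modifiers = ['micro', 'macro', 'meta', 'hyper', 'trans']
--
--         for modifier in modifiers[:2]:
--             new_text = f"{modifier}-{text}"
--             branches.extend(fractal_generate(new_text, level - 1))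
--
--         return branches
--
--     ideas = fractal_generate(prompt, depth)
--     return ideas[:5]
-- ===== SOURCE B (Python) =====
-- def fractal_recursion(prompt: str, depth: int = 3):
--     """Closed-form: the first 5 DFS leaves are determined by the 3 lowest
--     branch choices; everything above them is 'micro-'."""
--     if depth <= 0:
--         return [prompt]
--     mods = ('micro', 'macro')
--     b = min(depth, 3)
--     count = min(5, 1 << b)
--     tail = 'micro-' * max(depth - 3, 0) + prompt
--     return [''.join(mods[(k >> i) & 1] + '-' for i in range(b)) + tail
--             for k in range(count)]
-- ===== Notes on version B (the rewrite author's own statement) =====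
-- stated objective: alternative
-- what changed: B replaces the exponential binary recursion (which materialises all 2^depth leaves before truncating to 5) by a closed-form enumeration: the first 5 DFS leaves differ only in their 3 deepest branch choices, so B emits min(5, 2^min(depth,3)) strings directly, each a 3-bit head followed by depth-3 repetitions of the micro prefix and then the prompt; intended as faster (a timing run saw A time out at n=64 where B returned, but could not measure a ratio at the sizes both finish), so no speed is claimed.
import Mathlib
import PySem

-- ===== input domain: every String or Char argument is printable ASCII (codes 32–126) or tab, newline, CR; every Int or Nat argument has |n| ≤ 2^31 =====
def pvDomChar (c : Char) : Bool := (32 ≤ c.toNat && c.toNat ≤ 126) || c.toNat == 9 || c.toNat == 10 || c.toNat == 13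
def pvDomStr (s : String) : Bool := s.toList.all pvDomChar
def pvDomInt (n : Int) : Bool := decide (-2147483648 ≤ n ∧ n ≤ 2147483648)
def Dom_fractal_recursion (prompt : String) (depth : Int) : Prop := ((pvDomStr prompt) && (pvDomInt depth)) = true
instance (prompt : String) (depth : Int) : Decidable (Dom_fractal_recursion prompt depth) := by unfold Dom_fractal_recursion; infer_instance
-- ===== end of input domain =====

-- B enumerates the first 5 DFS leaves in closed form instead of building all 2^depth leaves.

-- ===== PORT A =====
-- the inner helper `fractal_generate(text, level)`; fuel = level.toNat (Python's `level <= 0` base case ↔ fuel 0, exact since new levels are level-1)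
def pvFGen (text : String) : Nat → List String
  | 0 => [text]
  | n+1 => (["micro", "macro", "meta", "hyper", "trans"].take 2).foldl
      (fun branches m => branches ++ pvFGen (m ++ "-" ++ text) n) []

def fractal_recursion (prompt : String) (depth : Int) : List String :=
  (pvFGen prompt depth.toNat).take 5

-- ===== PORT B =====
def fractal_recursion_alt (prompt : String) (depth : Int) : List String :=
  if depth ≤ 0 then [prompt]
  else
    let mods : List String := ["micro", "macro"]
    let b := (min depth 3).toNat
    let count := min 5 (1 <<< b)
    let tail := String.join (List.replicate (depth - 3).toNat "micro-") ++ prompt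
    (List.range count).map (fun k =>
      String.join ((List.range b).map (fun i => mods.getD ((k >>> i) &&& 1) "" ++ "-")) ++ tail)

-- ===== PRECONDITION & SPEC =====
-- Pre_ excludes depths above 990, on which Python A never returns a value: its recursion descends
-- `depth` nested frames, raising RecursionError once depth reaches the interpreter recursion limit
-- (~995 under CPython's default limit of 1000), and the few depths between 990 and that point require
-- 2^depth recursive calls, far beyond any possible evaluation; the proof uses Pre_ nowhere else.
def Pre_fractal_recursion (prompt : String) (depth : Int) : Prop := depth ≤ 990
instance (prompt : String) (depth : Int) : Decidable (Pre_fractal_recursion prompt depth) := by unfold Pre_fractal_recursion; infer_instance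
def pvWitness_fractal_recursion : String × Int := ("idea", 3)

def Spec_fractal_recursion (prompt : String) (depth : Int) (out : List String) : Prop := out = fractal_recursion_alt prompt depth
instance (prompt : String) (depth : Int) (out : List String) : Decidable (Spec_fractal_recursion prompt depth out) := by unfold Spec_fractal_recursion; infer_instance

-- ===== CLAIM (what is proved, stated in full; the proofs are below) =====
def Claim_equal_fractal_recursion : Prop := ∀ (prompt : String) (depth : Int), Dom_fractal_recursion prompt depth → Pre_fractal_recursion prompt depth → Spec_fractal_recursion prompt depth (fractal_recursion prompt depth)

-- ===== LEMMAS AND PROOFS =====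

theorem pvFGen_succ (t : String) (n : Nat) :
    pvFGen t (n+1) = pvFGen ("micro-" ++ t) n ++ pvFGen ("macro-" ++ t) n := by
  simp [pvFGen]

theorem pvFGen_length (n : Nat) : ∀ t : String, (pvFGen t n).length = 2 ^ n := by
  induction n with
  | zero => intro t; simp [pvFGen]
  | succ n ih => intro t; simp [pvFGen_succ, ih, pow_succ]; omega

def pvMicroRep (n : Nat) : String := String.join (List.replicate n "micro-")

theorem pvJoinFoldl (l : List String) : ∀ a : String, List.foldl (· ++ ·) a l = a ++ List.foldl (· ++ ·) "" l := by
  induction l with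
  | nil => intro a; simp
  | cons x xs ih => intro a; simp only [List.foldl_cons]; rw [ih ("" ++ x), ih (a ++ x)]; simp [String.append_assoc]

theorem pvMicroRep_succ (n : Nat) : pvMicroRep (n+1) = "micro-" ++ pvMicroRep n := by
  simp only [pvMicroRep, String.join, List.replicate_succ, List.foldl_cons]
  rw [pvJoinFoldl]; simp

theorem pvMicroRep_shift (n : Nat) (t : String) :
    pvMicroRep n ++ ("micro-" ++ t) = pvMicroRep (n+1) ++ t := by
  induction n generalizing t with
  | zero => simp [pvMicroRep, String.join]
  | succ n ih =>
      rw [pvMicroRep_succ, pvMicroRep_succ, String.append_assoc, String.append_assoc, ih,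
        pvMicroRep_succ, String.append_assoc]

theorem pvFGen_take5 (n : Nat) : ∀ t : String,
    (pvFGen t (n+3)).take 5 = (pvFGen (pvMicroRep n ++ t) 3).take 5 := by
  induction n with
  | zero => intro t; simp [pvMicroRep, String.join]
  | succ n ih =>
      intro t
      rw [show n + 1 + 3 = (n + 3) + 1 from rfl, pvFGen_succ,
        List.take_append_of_le_length (by rw [pvFGen_length]; calc (5:Nat) ≤ 2^3 := by norm_num
          _ ≤ 2^(n+3) := Nat.pow_le_pow_right (by norm_num) (by omega)),
        ih, pvMicroRep_shift]

-- ===== VERDICT (by name: the statement is the Claim_ definition above) =====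
theorem fractal_recursion_spec : Claim_equal_fractal_recursion := by
  intro prompt depth _ _
  unfold Spec_fractal_recursion fractal_recursion fractal_recursion_alt
  by_cases h0 : depth ≤ 0
  · have : depth.toNat = 0 := by omega
    simp [this, h0, pvFGen]
  · rw [if_neg h0]
    by_cases h1 : depth = 1
    · subst h1
      simp [pvFGen, String.join, List.range_succ]
    · by_cases h2 : depth = 2
      · subst h2
        simp [pvFGen, String.join, List.range_succ, ← String.append_assoc]
      · have h3 : 3 ≤ depth := by omega
        have hmin : (min depth 3).toNat = 3 := by omega
        obtain ⟨n, hn⟩ : ∃ n : Nat, depth.toNat = n + 3 := ⟨depth.toNat - 3, by omega⟩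
        have htail : (depth - 3).toNat = n := by omega
        rw [hn, pvFGen_take5, hmin, htail]
        simp [pvFGen, pvMicroRep, String.join, List.range_succ, String.append_assoc]
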